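-- pv_equiv track=rewrite | github.com/PsychoPo/KURS_IStoSPP | calculating.py | rec4_jons
-- ===== SOURCE A (Python) =====
-- from copy import deepcopy, copy
--
-- def rec4_jons(matr):
--     r = []
--     sumMatr = []
--
--     for i in range(len(matr[0])):
--         sum = 0
--         for j in range(len(matr)):
--             sum += matr[j][i]
--         sumMatr.append(sum)
--
--     mcopy = deepcopy(sumMatr)
--     mcopy.sort()
--     mcopy.reverse()
--
--     for i in mcopy:
--         for j in range(len(sumMatr)):
--             if sumMatr[j] == i:
--                 r.append(j)
--
--     r = list(dict.fromkeys(r))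
--     return r
-- ===== SOURCE B (Python) =====
-- def rec4_jons(matr):
--     ncols = len(matr[0])
--     sums = [sum(row[i] for row in matr) for i in range(ncols)]
--     return sorted(range(ncols), key=lambda j: (-sums[j], j))
-- ===== Notes on version B (the rewrite author's own statement) =====
-- stated objective: faster
-- what changed: B replaces A's copy-sort-reverse of the sums followed by a full index scan per sorted value plus a final dedup with a single stable sort of the column indices keyed by (-column sum, index).
import Mathlib
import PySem

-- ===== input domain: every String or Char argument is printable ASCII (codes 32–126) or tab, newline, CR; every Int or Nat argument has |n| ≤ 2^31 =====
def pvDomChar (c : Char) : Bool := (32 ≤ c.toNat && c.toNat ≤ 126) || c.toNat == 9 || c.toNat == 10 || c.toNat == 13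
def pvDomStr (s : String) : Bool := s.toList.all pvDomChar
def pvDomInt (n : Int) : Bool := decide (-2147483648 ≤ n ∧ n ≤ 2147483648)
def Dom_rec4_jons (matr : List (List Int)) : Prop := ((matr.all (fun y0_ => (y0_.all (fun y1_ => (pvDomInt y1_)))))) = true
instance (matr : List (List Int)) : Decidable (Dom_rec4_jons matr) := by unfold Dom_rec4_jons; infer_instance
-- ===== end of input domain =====

-- B replaces A's copy-sort-reverse of the sums plus a full index scan per sorted value
-- plus a final dedup with one stable sort of the column indices keyed by (-column sum, index).

-- ===== PORT A =====
def rec4_jons (matr : List (List Int)) : List Int :=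
  let sumMatr :=
    (PySem.List.pyRange 0 ((PySem.List.pyGetD matr 0 []).length : Int)).foldl
      (fun acc i =>
        acc ++ [(PySem.List.pyRange 0 (matr.length : Int)).foldl
          (fun s j => s + PySem.List.pyGetD (PySem.List.pyGetD matr j []) i 0) 0]) []
  let mcopy := (PySem.List.sorted sumMatr (fun x => x) false).reverse
  let r :=
    mcopy.foldl
      (fun acc i =>
        (PySem.List.pyRange 0 (sumMatr.length : Int)).foldl
          (fun acc2 j => if PySem.List.pyGetD sumMatr j 0 = i then acc2 ++ [j] else acc2) acc) []
  PySem.List.dedup r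

-- ===== PORT B =====
def rec4_jons_alt (matr : List (List Int)) : List Int :=
  let ncols := (PySem.List.pyGetD matr 0 []).length
  let sums :=
    (PySem.List.pyRange 0 (ncols : Int)).map
      (fun i => (matr.map (fun row => PySem.List.pyGetD row i 0)).sum)
  PySem.List.sorted2 (PySem.List.pyRange 0 (ncols : Int))
    (fun j => -(PySem.List.pyGetD sums j 0)) (fun j => j) false

-- ===== PRECONDITION & SPEC =====
-- Pre_ excludes exactly the inputs where the Python A raises IndexError: an empty matrix
-- (matr[0]) and matrices with a row shorter than the first row (matr[j][i]).
def Pre_rec4_jons (matr : List (List Int)) : Prop :=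
  matr ≠ [] ∧ ∀ row ∈ matr, (matr.headD []).length ≤ row.length
instance (matr : List (List Int)) : Decidable (Pre_rec4_jons matr) := by
  unfold Pre_rec4_jons; infer_instance
def pvWitness_rec4_jons : List (List Int) := [[1, 2], [3, 4]]

def Spec_rec4_jons (matr : List (List Int)) (out : List Int) : Prop := out = rec4_jons_alt matr
instance (matr : List (List Int)) (out : List Int) : Decidable (Spec_rec4_jons matr out) := by unfold Spec_rec4_jons; infer_instance

-- ===== CLAIM (what is proved, stated in full; the proofs are below) =====
def Claim_equal_rec4_jons : Prop := ∀ (matr : List (List Int)), Dom_rec4_jons matr → Pre_rec4_jons matr → Spec_rec4_jons matr (rec4_jons matr)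

-- ===== LEMMAS AND PROOFS =====

-- Python's sorted with a two-component tuple key is sorted with a lexicographic key.
theorem sorted2_eq_sorted_lex {α : Type} (xs : List α) (k1 k2 : α → Int) :
    PySem.List.sorted2 xs k1 k2 false
      = PySem.List.sorted xs (fun x => toLex (k1 x, k2 x)) false := by
  have hb : (fun a b : α => decide (k1 a < k1 b) || (!decide (k1 b < k1 a) && decide (k2 a < k2 b)))
      = (fun a b : α => decide (toLex (k1 a, k2 a) < toLex (k1 b, k2 b))) := by
    funext a b
    rw [Bool.eq_iff_iff]
    simp only [Bool.or_eq_true, Bool.and_eq_true, Bool.not_eq_true', decide_eq_true_eq,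
      decide_eq_false_iff_not, Prod.Lex.lt_iff, ofLex_toLex]
    omega
  show xs.foldl
      (fun acc x => PySem.List.insertBy
        (fun a b => decide (k1 a < k1 b) || (!decide (k1 b < k1 a) && decide (k2 a < k2 b))) x acc) []
    = xs.foldl
      (fun acc x => PySem.List.insertBy
        (fun a b => decide (toLex (k1 a, k2 a) < toLex (k1 b, k2 b))) x acc) []
  rw [hb]

theorem dedup_sublist {α : Type} [BEq α] [LawfulBEq α] (xs : List α) :
    (PySem.List.dedup xs).Sublist xs := by
  induction xs with
  | nil => exact List.Sublist.refl _
  | cons x xs ih =>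
    have h1 : List.Sublist ((PySem.Set.ofList xs).discard x) (PySem.Set.ofList xs) := List.filter_sublist
    rw [PySem.List.dedup_eq_ofList, PySem.Set.ofList_cons]
    exact List.Sublist.cons₂ x
      (h1.trans (by rw [← PySem.List.dedup_eq_ofList]; exact ih))

-- filtering a disjoint-block flatMap by "not in block v" drops exactly the block of v
theorem flatMap_filter_not_mem (f : Int → List Int)
    (hdisj : ∀ v w x, x ∈ f v → x ∈ f w → v = w) (v : Int) (ws : List Int) :
    (ws.flatMap f).filter (fun y => !(f v).contains y)
      = (ws.filter (fun w => !(w == v))).flatMap f := by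
  induction ws with
  | nil => rfl
  | cons w ws ih =>
    rw [List.flatMap_cons, List.filter_append, ih, List.filter_cons]
    by_cases hw : w = v
    · subst hw
      have h1 : (f w).filter (fun y => !(f w).contains y) = [] := by
        rw [List.filter_eq_nil_iff]
        intro y hy
        simp [hy]
      rw [h1, List.nil_append, if_neg (by simp)]
    · have h1 : (f w).filter (fun y => !(f v).contains y) = f w := by
        rw [List.filter_eq_self]
        intro y hy
        have hnv : y ∉ f v := fun hyv => hw (hdisj w v y hy hyv)
        simp [hnv]
      rw [h1, if_pos (by simp [hw]), List.flatMap_cons]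

-- dedup of a flatMap of pairwise-disjoint duplicate-free blocks is the flatMap over the deduped values
theorem dedup_flatMap_blocks (f : Int → List Int)
    (hnd : ∀ v, (f v).Nodup) (hdisj : ∀ v w x, x ∈ f v → x ∈ f w → v = w) :
    ∀ vs : List Int, PySem.List.dedup (vs.flatMap f) = (PySem.List.dedup vs).flatMap f := by
  intro vs
  induction vs with
  | nil => rfl
  | cons v ws ih =>
    have h1 : PySem.List.dedup ((v :: ws).flatMap f)
        = f v ++ (PySem.List.dedup (ws.flatMap f)).filter (fun y => !(f v).contains y) := by
      rw [List.flatMap_cons, PySem.List.dedup_eq_ofList, PySem.Set.ofList_append,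
        PySem.Set.update_eq_append_filter, PySem.Set.ofList_eq_self_of_nodup _ (hnd v),
        ← PySem.List.dedup_eq_ofList]
      rfl
    have h2 : (PySem.List.dedup (v :: ws)).flatMap f
        = f v ++ ((PySem.List.dedup ws).filter (fun w => !(w == v))).flatMap f := by
      rw [PySem.List.dedup_eq_ofList, PySem.Set.ofList_cons, List.flatMap_cons,
        ← PySem.List.dedup_eq_ofList]
      rfl
    rw [h1, ih, flatMap_filter_not_mem f hdisj v _, h2]

-- the A-side inner summation loop computes the column sum
theorem innerSumLoop (matr : List (List Int)) (i : Int) :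
    (PySem.List.pyRange 0 (matr.length : Int)).foldl
        (fun s j => s + PySem.List.pyGetD (PySem.List.pyGetD matr j []) i 0) 0
      = (matr.map (fun row => PySem.List.pyGetD row i 0)).sum := by
  rw [PySem.List.foldl_pyRange_zero_pyGetD' matr [] (fun s row => s + PySem.List.pyGetD row i 0) 0,
    PySem.List.foldl_add, zero_add]

-- Prop-conditioned append-if loop is a filter
theorem foldl_append_ite {α : Type} (p : α → Prop) [DecidablePred p] (l : List α) (acc : List α) :
    l.foldl (fun acc x => if p x then acc ++ [x] else acc) acc
      = acc ++ l.filter (fun x => decide (p x)) := by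
  have h := PySem.List.foldl_append_if (fun x => decide (p x)) (fun x : α => x) l acc
  simpa using h

-- THE CORE: A's grouped descending value scan, deduplicated, is the stable sort of the
-- index range by the lexicographic key (-sum, index).
theorem core (S : List Int) :
    PySem.List.dedup
        ((PySem.List.sorted S (fun x => x) false).reverse.flatMap
          (fun v => (PySem.List.pyRange 0 (S.length : Int)).filter
            (fun j => decide (PySem.List.pyGetD S j 0 = v))))
      = PySem.List.sorted (PySem.List.pyRange 0 (S.length : Int))
          (fun j => toLex (-(PySem.List.pyGetD S j 0), j)) false := by
  set idx := PySem.List.pyRange 0 (S.length : Int) with hidx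
  set mc := (PySem.List.sorted S (fun x => x) false).reverse with hmc
  set f : Int → List Int :=
    fun v => idx.filter (fun j => decide (PySem.List.pyGetD S j 0 = v)) with hf
  have hidxnd : idx.Nodup := by rw [hidx]; exact PySem.List.nodup_pyRange_one 0 _
  have hblock : ∀ v j, j ∈ f v ↔ (j ∈ idx ∧ PySem.List.pyGetD S j 0 = v) := by
    intro v j; rw [hf]; simp [List.mem_filter]
  have hgmem : ∀ j ∈ idx, PySem.List.pyGetD S j 0 ∈ S := by
    intro j hj
    rw [hidx, PySem.List.mem_pyRange_one] at hj
    obtain ⟨h0, h1⟩ := hj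
    rw [show j = ((j.toNat : Nat) : Int) from (Int.toNat_of_nonneg h0).symm,
      PySem.List.pyGetD_natCast]
    have hlt : j.toNat < S.length := by omega
    rw [List.getD_eq_getElem _ _ hlt]
    exact List.getElem_mem _
  have hmcS : ∀ v, v ∈ mc ↔ v ∈ S := by
    intro v; rw [hmc, List.mem_reverse, PySem.List.mem_sorted]
  have hnd : ∀ v, (f v).Nodup := fun v => List.Sublist.nodup List.filter_sublist hidxnd
  have hdisj : ∀ v w x, x ∈ f v → x ∈ f w → v = w := by
    intro v w x hv hw
    rw [hblock] at hv hw
    rw [← hv.2, hw.2]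
  have heq := dedup_flatMap_blocks f hnd hdisj mc
  symm
  apply PySem.List.sorted_eq_of_perm_of_pairwise_lt
  · -- permutation of the index range
    rw [List.perm_ext_iff_of_nodup (PySem.List.nodup_dedup _) hidxnd]
    intro j
    rw [PySem.List.mem_dedup, List.mem_flatMap]
    constructor
    · rintro ⟨v, _, hj⟩
      exact ((hblock v j).mp hj).1
    · intro hj
      exact ⟨PySem.List.pyGetD S j 0, (hmcS _).mpr (hgmem j hj), (hblock _ j).mpr ⟨hj, rfl⟩⟩
  · -- strictly increasing lexicographic key
    rw [heq, List.pairwise_flatMap]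
    constructor
    · intro v _
      have h1 : (f v).Pairwise (fun a b => a < b) := by
        refine List.Pairwise.sublist List.filter_sublist ?_
        rw [hidx]; exact PySem.List.pairwise_lt_pyRange_one 0 _
      refine h1.imp_of_mem ?_
      intro a b ha hb hab
      have hga := ((hblock v a).mp ha).2
      have hgb := ((hblock v b).mp hb).2
      rw [Prod.Lex.lt_iff]
      right
      refine ⟨?_, hab⟩
      simp [hga, hgb]
    · have h2 : mc.Pairwise (fun a b => b ≤ a) := by
        rw [hmc, List.pairwise_reverse]
        exact PySem.List.sorted_pairwise S (fun x => x)
      have h3 : (PySem.List.dedup mc).Pairwise (fun a b => b ≤ a) :=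
        List.Pairwise.sublist (dedup_sublist mc) h2
      have h4 : (PySem.List.dedup mc).Pairwise (fun a b => a ≠ b) :=
        PySem.List.nodup_dedup mc
      refine (h3.and h4).imp ?_
      rintro v w ⟨hle, hne⟩ x hx y hy
      have hgx := ((hblock v x).mp hx).2
      have hgy := ((hblock w y).mp hy).2
      rw [Prod.Lex.lt_iff]
      left
      simp only [ofLex_toLex]
      rw [hgx, hgy]
      omega

-- ===== VERDICT (by name: the statement is the Claim_ definition above) =====
theorem rec4_jons_spec : Claim_equal_rec4_jons := by
  intro matr _ _
  show rec4_jons matr = rec4_jons_alt matr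
  unfold rec4_jons rec4_jons_alt
  simp only [PySem.List.foldl_append_singleton_eq_map, List.nil_append, innerSumLoop,
    foldl_append_ite, PySem.List.foldl_append_eq_flatMap]
  set S := (PySem.List.pyRange 0 ((PySem.List.pyGetD matr 0 []).length : Int)).map
      (fun i => (matr.map (fun row => PySem.List.pyGetD row i 0)).sum) with hS
  have hlen : ((S.length : Nat) : Int) = (((PySem.List.pyGetD matr 0 []).length : Nat) : Int) := by
    rw [hS, List.length_map, PySem.List.length_pyRange_one]
    omega
  have hc := core S
  rw [hlen] at hc
  rw [hlen, sorted2_eq_sorted_lex]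
  exact hc
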